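-- pv_equiv track=rewrite | github.com/vladsolokha/playcode | Code Challenges/l-r-mult-bool-arr.py | solution
-- ===== SOURCE A (Python) =====
-- def solution(a, l, r):
--     b = []
--     x = 0
--     for i in range(len(a)):
--         if a[i] == (i + 1) * x and (l >= x and r <= x):
--             b.append(True);
--         else:
--             b.append(False);
--     return b
-- ===== SOURCE B (Python) =====
-- def solution(a, l, r):
--     # Recursive decomposition: x in A is always 0, so the per-element test is
--     # a[i] == 0 under the invariant guard l >= 0 and r <= 0.
--     if not a:
--         return []
--     if l < 0 or r > 0:
--         return [False] * len(a)
--     return [a[0] == 0] + solution(a[1:], l, r)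
-- ===== Notes on version B (the rewrite author's own statement) =====
-- stated objective: alternative
-- what changed: A builds the result with an indexed loop and an accumulator evaluating the combined per-index condition each iteration; B is a structural recursion on the list that short-circuits to a uniform [False]*len(a) fill as soon as the guard (l >= 0 and r <= 0) fails and otherwise prepends a[0] == 0 to the recursive result.
import Mathlib
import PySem

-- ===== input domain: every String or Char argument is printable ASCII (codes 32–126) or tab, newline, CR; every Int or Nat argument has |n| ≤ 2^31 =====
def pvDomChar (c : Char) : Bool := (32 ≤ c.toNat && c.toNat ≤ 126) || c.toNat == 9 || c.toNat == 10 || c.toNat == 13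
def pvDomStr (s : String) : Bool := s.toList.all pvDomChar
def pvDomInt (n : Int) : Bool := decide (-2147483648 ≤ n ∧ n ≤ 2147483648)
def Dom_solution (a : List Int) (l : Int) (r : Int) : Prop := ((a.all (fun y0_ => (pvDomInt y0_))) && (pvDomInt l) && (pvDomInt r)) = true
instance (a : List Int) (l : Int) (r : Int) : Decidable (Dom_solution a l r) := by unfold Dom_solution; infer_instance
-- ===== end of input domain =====

-- B replaces A's indexed accumulator loop by a structural recursion on the list that
-- short-circuits to a uniform all-False fill when the guard fails (objective: alternative).

-- ===== PORT A =====
def solution (a : List Int) (l : Int) (r : Int) : List Bool :=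
  let x : Int := 0
  (PySem.List.pyRange 0 a.length 1).foldl
    (fun b i =>
      if PySem.List.pyGetD a i 0 = (i + 1) * x ∧ (l ≥ x ∧ r ≤ x) then b ++ [true]
      else b ++ [false]) []

-- ===== PORT B =====
def solution_alt : List Int → Int → Int → List Bool
  | [], _, _ => []
  | v :: t, l, r =>
    if l < 0 ∨ r > 0 then List.replicate (v :: t).length false
    else decide (v = 0) :: solution_alt t l r

-- ===== PRECONDITION & SPEC =====
def Spec_solution (a : List Int) (l : Int) (r : Int) (out : List Bool) : Prop := out = solution_alt a l r
instance (a : List Int) (l : Int) (r : Int) (out : List Bool) : Decidable (Spec_solution a l r out) := by unfold Spec_solution; infer_instance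

-- ===== CLAIM =====
def Claim_equal_solution : Prop := ∀ (a : List Int) (l : Int) (r : Int), Dom_solution a l r → Spec_solution a l r (solution a l r)

-- ===== LEMMAS AND PROOFS =====
theorem solution_eq_map (a : List Int) (l : Int) (r : Int) :
    solution a l r = a.map (fun v => decide (v = 0 ∧ (l ≥ 0 ∧ r ≤ 0))) := by
  unfold solution
  have h : ∀ (b : List Bool),
      (PySem.List.pyRange 0 a.length 1).foldl
        (fun b i =>
          if PySem.List.pyGetD a i 0 = (i + 1) * 0 ∧ (l ≥ 0 ∧ r ≤ 0) then b ++ [true]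
          else b ++ [false]) b
      = b ++ (PySem.List.pyRange 0 a.length 1).map
          (fun i => decide (PySem.List.pyGetD a i 0 = 0 ∧ (l ≥ 0 ∧ r ≤ 0))) := by
    induction (PySem.List.pyRange 0 a.length 1) with
    | nil => intro b; simp
    | cons i t ih =>
      intro b
      simp only [List.foldl_cons, List.map_cons, ih]
      by_cases hc : PySem.List.pyGetD a i 0 = 0 ∧ (l ≥ 0 ∧ r ≤ 0) <;>
        simp [hc]
  simp only [h, List.nil_append]
  have hm := PySem.List.map_pyGetD_pyRange_zero (xs := a) (d := 0)
  simp only [PySem.List.len] at hm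
  conv_rhs => rw [← hm]
  rw [List.map_map]; rfl

theorem solution_alt_eq_map (a : List Int) (l : Int) (r : Int) :
    solution_alt a l r = a.map (fun v => decide (v = 0 ∧ (l ≥ 0 ∧ r ≤ 0))) := by
  induction a with
  | nil => rfl
  | cons v t ih =>
    unfold solution_alt
    by_cases h : l < 0 ∨ r > 0
    · have hg : ¬ (l ≥ 0 ∧ r ≤ 0) := by omega
      simp [h, hg, List.replicate_succ]
    · have hg : l ≥ 0 ∧ r ≤ 0 := by omega
      simp [h, ih, hg]

-- ===== VERDICT =====
theorem solution_spec : Claim_equal_solution := by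
  intro a l r _
  unfold Spec_solution
  rw [solution_eq_map, solution_alt_eq_map]
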